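-- pv_equiv track=rewrite | github.com/ihshareef/vits | text/transliterator.py | sub_divide_numbers_into_places
-- ===== SOURCE A (Python) =====
-- from typing import List
--
-- def sub_divide_numbers_into_places(number: str) -> List[List[str]]:
--     reversed_number = number[::-1]
--     result = []
--     i = 0
--     while i < len(reversed_number):
--         tmp_array = ['', '']
--         if i + 2 < len(reversed_number):
--             tmp_array[0] = reversed_number[i + 2]
--         else:
--             tmp_array[0] = ""
--         if i + 1 < len(reversed_number):
--             tmp_array[1] = reversed_number[i + 1] + reversed_number[i]
--         else:
--             tmp_array[1] = reversed_number[i]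
--         result.append(tmp_array)
--         i += 3
--     return result[::-1]
-- ===== SOURCE B (Python) =====
-- from typing import List
--
-- def sub_divide_numbers_into_places(number: str) -> List[List[str]]:
--     chunks = []
--     s = number
--     while s:
--         chunks.append(s[-3:])
--         s = s[:-3]
--     chunks.reverse()
--     return [[c[:-2], c[-2:]] for c in chunks]
-- ===== Notes on version B (the rewrite author's own statement) =====
-- stated objective: simpler
-- what changed: Replaces the reversed-string index-stepping while loop with peeling 3-character chunks off the right end and slicing each chunk into [c[:-2], c[-2:]], removing the reversal and all index bookkeeping.
import Mathlib
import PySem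

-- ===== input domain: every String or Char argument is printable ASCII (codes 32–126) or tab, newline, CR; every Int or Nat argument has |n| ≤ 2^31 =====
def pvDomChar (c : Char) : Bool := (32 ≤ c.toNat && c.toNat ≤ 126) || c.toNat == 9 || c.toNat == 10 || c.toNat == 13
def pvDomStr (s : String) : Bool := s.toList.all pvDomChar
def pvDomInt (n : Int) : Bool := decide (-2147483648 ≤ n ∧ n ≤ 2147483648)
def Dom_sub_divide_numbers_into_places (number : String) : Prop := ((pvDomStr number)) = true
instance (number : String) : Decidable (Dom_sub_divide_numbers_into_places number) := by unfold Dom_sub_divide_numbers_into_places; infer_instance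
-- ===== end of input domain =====

-- ===== PORT A =====
-- B peels 3-char chunks off the right end instead of reversing and index-stepping; same values, plainer decomposition.
-- A: reversed_number = number[::-1]; while i < len stepping by 3, reading rev[i], rev[i+1], rev[i+2];
-- the structural recursion below consumes the reversed char list three at a time, branches in A's order
-- (i+2 < len / i+1 < len / neither), then the final result[::-1] is the .reverse at the end.
def pvALoop : List Char → List (List String)
  | x :: y :: z :: rest => [String.ofList [z], String.ofList [y, x]] :: pvALoop rest   -- i+2 < len
  | [x, y] => [["", String.ofList [y, x]]]                                        -- i+1 < len only
  | [x] => [["", String.ofList [x]]]                                              -- last lone char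
  | [] => []

def sub_divide_numbers_into_places (number : String) : List (List String) :=
  (pvALoop number.toList.reverse).reverse

-- ===== PORT B =====
-- while s: chunks.append(s[-3:]); s = s[:-3]   (s[-3:] = drop (len-3), s[:-3] = take (len-3))
def pvPeel (s : List Char) : List (List Char) :=
  if s = [] then []
  else (s.drop (s.length - 3)) :: pvPeel (s.take (s.length - 3))
termination_by s.length
decreasing_by
  rename_i h
  cases s with
  | nil => exact absurd rfl h
  | cons a t => simp [List.length_take]

-- [c[:-2], c[-2:]] for a chunk c
def pvPair (c : List Char) : List String :=
  [String.ofList (c.take (c.length - 2)), String.ofList (c.drop (c.length - 2))]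

def sub_divide_numbers_into_places_alt (number : String) : List (List String) :=
  ((pvPeel number.toList).reverse).map pvPair

-- ===== PRECONDITION & SPEC =====
def Spec_sub_divide_numbers_into_places (number : String) (out : List (List String)) : Prop := out = sub_divide_numbers_into_places_alt number
instance (number : String) (out : List (List String)) : Decidable (Spec_sub_divide_numbers_into_places number out) := by unfold Spec_sub_divide_numbers_into_places; infer_instance

-- ===== CLAIM (what is proved, stated in full; the proofs are below) =====
def Claim_equal_sub_divide_numbers_into_places : Prop := ∀ (number : String), Dom_sub_divide_numbers_into_places number → Spec_sub_divide_numbers_into_places number (sub_divide_numbers_into_places number)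

-- ===== LEMMAS AND PROOFS =====

-- ===== VERDICT (by name: the statement is the Claim_ definition above) =====
-- key invariant: the A-loop over the reversed characters produces exactly the pairs of B's
-- right-to-left chunks (both in right-to-left order), so the two final reversals agree.
theorem pvKey : ∀ (s : List Char), pvALoop s.reverse = (pvPeel s).map pvPair := by
  intro s
  induction s using pvPeel.induct with
  | case1 =>
    simp [pvPeel, pvALoop]
  | case2 s h ih =>
    rw [pvPeel, if_neg h]
    by_cases h3 : 3 ≤ s.length
    · have hd : (s.drop (s.length - 3)).length = 3 := by
        simp [List.length_drop]; omega
      obtain ⟨a, b, c, hd3⟩ : ∃ a b c, s.drop (s.length - 3) = [a, b, c] := by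
        rcases e : s.drop (s.length - 3) with _ | ⟨a, _ | ⟨b, _ | ⟨c, _ | ⟨x, r⟩⟩⟩⟩ <;>
          rw [e] at hd <;> simp at hd
        exact ⟨a, b, c, rfl⟩
      have hs : s.take (s.length - 3) ++ [a, b, c] = s := by
        rw [← hd3]; exact List.take_append_drop _ _
      have hrev : s.reverse = c :: b :: a :: (s.take (s.length - 3)).reverse := by
        rw [← hs]; simp
      rw [hrev, hd3]
      simp [pvALoop, pvPair, ih]
    · rcases s with _ | ⟨x, _ | ⟨y, _ | ⟨z, u⟩⟩⟩
      · exact absurd rfl h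
      · simp [pvPeel, pvALoop, pvPair]
      · simp [pvPeel, pvALoop, pvPair]
      · exfalso; simp at h3

theorem sub_divide_numbers_into_places_spec : Claim_equal_sub_divide_numbers_into_places := by
  intro number _
  unfold Spec_sub_divide_numbers_into_places sub_divide_numbers_into_places sub_divide_numbers_into_places_alt
  rw [pvKey, List.map_reverse]
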